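-- pv_equiv track=rewrite | github.com/emmascode/GeorgiaTech-CS1310xIII | Practice Coding Problems/AbstractNames.py | abstract_names
-- ===== SOURCE A (Python) =====
-- def abstract_names(listoflist):
--     Finaldict = {}
--     for item in listoflist:
--         for items in item:
--             items = items.split()
--             item0 = items[0]
--             if item0  not in Finaldict:
--                 Finaldict[item0]=[items[1]]
--             else:
--                 Finaldict[item0]+=[items[1]]
--
--     for values in Finaldict.values():
--         values.sort()
--     return Finaldict
-- ===== SOURCE B (Python) =====
-- def abstract_names(listoflist):
--     pairs = []
--     for row in listoflist:
--         for entry in row: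
--             tokens = entry.split()
--             pairs.append((tokens[0], tokens[1]))
--     order = list(dict.fromkeys(first for first, _ in pairs))
--     return {first: sorted(second for f, second in pairs if f == first)
--             for first in order}
-- ===== Notes on version B (the rewrite author's own statement) =====
-- stated objective: alternative
-- what changed: B replaces A's incremental dict-bucketing with in-place per-bucket sorts by: flatten everything once into a (first,second) pair list, dedup the first tokens for key order, then build the dict in one comprehension with a per-key filter + sort.
import Mathlib
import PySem

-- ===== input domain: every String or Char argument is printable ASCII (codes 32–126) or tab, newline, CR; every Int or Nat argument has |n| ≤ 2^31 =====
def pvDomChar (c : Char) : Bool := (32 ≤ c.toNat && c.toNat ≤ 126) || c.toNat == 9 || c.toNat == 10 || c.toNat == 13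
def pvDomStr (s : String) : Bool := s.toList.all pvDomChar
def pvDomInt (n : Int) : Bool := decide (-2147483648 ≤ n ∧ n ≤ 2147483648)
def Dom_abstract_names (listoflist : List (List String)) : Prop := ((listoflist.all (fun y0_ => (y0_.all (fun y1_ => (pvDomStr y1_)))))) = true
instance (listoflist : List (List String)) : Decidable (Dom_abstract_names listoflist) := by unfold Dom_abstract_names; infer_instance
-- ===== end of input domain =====

-- B flattens everything once into a (first, second) token-pair list, dedups the first tokens for key order,
-- and builds the result in one comprehension with a per-key filter + sort, instead of A's incremental dict
-- bucketing followed by in-place bucket sorts.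

-- ===== PORT A =====
def abstract_names (listoflist : List (List String)) : List (String × List String) :=
  let finaldict := listoflist.foldl (fun d item =>
    item.foldl (fun d itemsStr =>
      let items := PySem.Str.split₀ itemsStr
      let item0 := PySem.List.pyGetD items 0 ""
      if !(d.contains item0) then
        d.insert item0 [PySem.List.pyGetD items 1 ""]
      else
        d.insert item0 (d.getD item0 [] ++ [PySem.List.pyGetD items 1 ""])) d)
    PySem.Dict.empty
  finaldict.items.map (fun p => (p.1, PySem.List.sorted p.2 (fun x => x) false))

-- ===== PORT B =====
def abstract_names_alt (listoflist : List (List String)) : List (String × List String) :=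
  let pairs := listoflist.foldl (fun acc row =>
    row.foldl (fun acc entry =>
      let tokens := PySem.Str.split₀ entry
      acc ++ [(PySem.List.pyGetD tokens 0 "", PySem.List.pyGetD tokens 1 "")]) acc) []
  let order := PySem.List.dedup (pairs.map (fun p => p.1))
  order.map (fun f =>
    (f, PySem.List.sorted ((pairs.filter (fun p => p.1 == f)).map (fun p => p.2)) (fun x => x) false))

-- ===== PRECONDITION & SPEC =====
-- Pre_ excludes exactly the inputs on which the Python A raises IndexError: some entry string with
-- fewer than two whitespace-separated tokens.
def Pre_abstract_names (listoflist : List (List String)) : Prop :=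
  ∀ row ∈ listoflist, ∀ s ∈ row, 2 ≤ (PySem.Str.split₀ s).length
instance (listoflist : List (List String)) : Decidable (Pre_abstract_names listoflist) := by unfold Pre_abstract_names; infer_instance
def pvWitness_abstract_names : List (List String) := [["a b", "c d"], ["a e"]]

def Spec_abstract_names (listoflist : List (List String)) (out : List (String × List String)) : Prop := out = abstract_names_alt listoflist
instance (listoflist : List (List String)) (out : List (String × List String)) : Decidable (Spec_abstract_names listoflist out) := by unfold Spec_abstract_names; infer_instance

-- ===== CLAIM (what is proved, stated in full; the proofs are below) =====
def Claim_equal_abstract_names : Prop := ∀ (listoflist : List (List String)), Dom_abstract_names listoflist → Pre_abstract_names listoflist → Spec_abstract_names listoflist (abstract_names listoflist)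

-- ===== LEMMAS AND PROOFS =====

-- the (first, second) token pair of one entry string
def pvPair (s : String) : String × String :=
  (PySem.List.pyGetD (PySem.Str.split₀ s) 0 "", PySem.List.pyGetD (PySem.Str.split₀ s) 1 "")

-- all token pairs of the input, in left-to-right order
def pvPairs (listoflist : List (List String)) : List (String × String) :=
  listoflist.flatMap (fun row => row.map pvPair)

-- A's loop body is exactly the modify-style grouping step on the entry's token pair
lemma pv_step_eq (d : PySem.Dict String (List String)) (s : String) :
    (let items := PySem.Str.split₀ s
     let item0 := PySem.List.pyGetD items 0 ""
     if !(d.contains item0) then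
       d.insert item0 [PySem.List.pyGetD items 1 ""]
     else
       d.insert item0 (d.getD item0 [] ++ [PySem.List.pyGetD items 1 ""]))
    = d.modify (pvPair s).1 [] (· ++ [(pvPair s).2]) := by
  simp only [PySem.Dict.modify, PySem.Dict.getD_eq_get?_getD, pvPair]
  cases h : d.contains (PySem.List.pyGetD (PySem.Str.split₀ s) 0 "") with
  | false =>
    have hg : d.get? (PySem.List.pyGetD (PySem.Str.split₀ s) 0 "") = none := by
      rw [PySem.Dict.get?_eq_none_iff_contains]; exact h
    simp [hg]
  | true => simp

-- A's nested dict-building loop is the grouping fold over the flattened pair list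
lemma pv_a_dict (listoflist : List (List String)) (d : PySem.Dict String (List String)) :
    listoflist.foldl (fun d item =>
      item.foldl (fun d itemsStr =>
        let items := PySem.Str.split₀ itemsStr
        let item0 := PySem.List.pyGetD items 0 ""
        if !(d.contains item0) then
          d.insert item0 [PySem.List.pyGetD items 1 ""]
        else
          d.insert item0 (d.getD item0 [] ++ [PySem.List.pyGetD items 1 ""])) d) d
    = (pvPairs listoflist).foldl (fun d p => d.modify p.1 [] (· ++ [p.2])) d := by
  induction listoflist generalizing d with
  | nil => rfl
  | cons row rest ih =>
    simp only [List.foldl_cons, pvPairs, List.flatMap_cons, List.foldl_append]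
    rw [show (pvPairs rest) = rest.flatMap (fun row => row.map pvPair) from rfl] at ih
    rw [ih]
    congr 1
    have hstep : (fun (d : PySem.Dict String (List String)) (itemsStr : String) =>
        let items := PySem.Str.split₀ itemsStr
        let item0 := PySem.List.pyGetD items 0 ""
        if !(d.contains item0) then
          d.insert item0 [PySem.List.pyGetD items 1 ""]
        else
          d.insert item0 (d.getD item0 [] ++ [PySem.List.pyGetD items 1 ""]))
        = (fun d s => d.modify (pvPair s).1 [] (· ++ [(pvPair s).2])) := by
      funext d s; exact pv_step_eq d s
    rw [hstep]
    exact (List.foldl_map (f := pvPair)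
      (g := fun (d : PySem.Dict String (List String)) (p : String × String) => d.modify p.1 [] (· ++ [p.2]))).symm

-- B's nested append loop builds exactly the flattened pair list
lemma pv_alt_pairs (listoflist : List (List String)) (acc : List (String × String)) :
    listoflist.foldl (fun acc row =>
      row.foldl (fun acc entry =>
        let tokens := PySem.Str.split₀ entry
        acc ++ [(PySem.List.pyGetD tokens 0 "", PySem.List.pyGetD tokens 1 "")]) acc) acc
    = acc ++ pvPairs listoflist := by
  have hrow : (fun (acc : List (String × String)) (row : List String) =>
      row.foldl (fun acc entry =>
        let tokens := PySem.Str.split₀ entry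
        acc ++ [(PySem.List.pyGetD tokens 0 "", PySem.List.pyGetD tokens 1 "")]) acc)
      = (fun acc row => acc ++ row.map pvPair) := by
    funext acc row
    exact PySem.List.foldl_append_singleton_eq_map ..
  rw [hrow]
  exact PySem.List.foldl_append_eq_flatMap ..

-- ===== VERDICT (by name: the statement is the Claim_ definition above) =====
theorem abstract_names_spec : Claim_equal_abstract_names := by
  intro lol _ _
  show abstract_names lol = abstract_names_alt lol
  simp only [abstract_names, abstract_names_alt]
  rw [pv_a_dict, pv_alt_pairs, List.nil_append]
  set ps := pvPairs lol with hps
  set D := ps.foldl (fun d p => d.modify p.1 [] (· ++ [p.2])) PySem.Dict.empty with hD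
  have hnd : D.keys.Nodup := by
    rw [hD]
    exact PySem.Dict.nodup_keys_foldl_modify_key ps (fun p => p.1) [] (fun d p => (· ++ [p.2]))
      PySem.Dict.empty (by simp)
  have hkeys : D.keys = PySem.List.dedup (ps.map (fun p => p.1)) := by
    rw [hD, PySem.Dict.keys_foldl_modify_key]
    simp [PySem.Set.update_nil_left]
  have hget : ∀ k, D.getD k [] = (ps.filter (fun p => p.1 == k)).map (fun p => p.2) := by
    intro k
    rw [hD, PySem.Dict.getD_foldl_modify_append]
    simp
  rw [PySem.Dict.items_eq_map_keys D hnd [], hkeys, List.map_map]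
  apply List.map_congr_left
  intro k _
  simp [hget k]
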